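-- pv_equiv track=rewrite | github.com/datnt88/neural_coherence | utilities/data_helper.py | get_sentences_depth
-- ===== SOURCE A (Python) =====
-- def get_tree_struct(cmtIDs=[],tree=[]):
--     x_tree = []
--     for branch in tree:
--         sentIDs = []
--         for cmtID in branch:
--             sentIDs += [ i for i, id_ in enumerate(cmtIDs) if id_ == int(cmtID)]
--         x_tree.append(sentIDs)
--
--     return x_tree
--
-- def get_sentences_depth(cmtIDs=[],tree=[]):
--     branches = get_tree_struct(cmtIDs=cmtIDs,tree=tree) # get branches with sentID
--     level_dict = {}
--
--     for branch in branches: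
--         for i,j in enumerate(branch):
--             level_dict[j] = i
--
--     sentDepths = level_dict.values()
--
--     return sentDepths
-- ===== SOURCE B (Python) =====
-- def get_sentences_depth(cmtIDs=[], tree=[]):
--     # Build an index value -> ascending list of positions in cmtIDs ONCE,
--     # so the per-branch-element scan of cmtIDs disappears.
--     index = {}
--     for i, id_ in enumerate(cmtIDs):
--         index[id_] = index.get(id_, []) + [i]
--     level_dict = {}
--     for branch in tree:
--         pos = 0
--         for cmtID in branch:
--             for i in index.get(int(cmtID), ()):
--                 level_dict[i] = pos
--                 pos += 1
--     return level_dict.values()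
-- ===== Notes on version B (the rewrite author's own statement) =====
-- stated objective: faster
-- what changed: B builds a hash index from cmtID value to its ascending list of positions in cmtIDs once, then answers each branch element by one dict lookup, so A's inner scan of cmtIDs per branch element (and the intermediate x_tree list-of-lists) disappears.
import Mathlib
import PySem

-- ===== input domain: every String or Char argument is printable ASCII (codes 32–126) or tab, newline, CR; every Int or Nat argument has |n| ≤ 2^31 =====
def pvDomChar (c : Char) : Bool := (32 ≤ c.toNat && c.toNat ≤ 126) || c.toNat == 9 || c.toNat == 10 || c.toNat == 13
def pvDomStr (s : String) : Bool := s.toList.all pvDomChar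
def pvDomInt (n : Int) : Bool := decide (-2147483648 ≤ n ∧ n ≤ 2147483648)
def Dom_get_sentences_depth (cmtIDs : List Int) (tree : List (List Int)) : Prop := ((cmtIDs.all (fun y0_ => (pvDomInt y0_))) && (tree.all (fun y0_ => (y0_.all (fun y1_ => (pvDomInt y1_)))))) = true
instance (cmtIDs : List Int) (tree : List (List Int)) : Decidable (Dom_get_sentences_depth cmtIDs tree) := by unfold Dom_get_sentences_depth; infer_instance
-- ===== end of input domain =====

-- ===== PORT A =====
-- B builds a value->positions hash index over cmtIDs once, replacing A's
-- inner scan of cmtIDs per branch element (and the intermediate x_tree).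
def get_tree_struct (cmtIDs : List Int) (tree : List (List Int)) : List (List Int) :=
  tree.foldl (fun x_tree branch =>
    x_tree ++ [branch.foldl (fun sentIDs cmtID =>
      sentIDs ++ ((PySem.List.enumerate cmtIDs 0).filter (fun p => p.2 == cmtID)).map Prod.fst) []]) []

def get_sentences_depth (cmtIDs : List Int) (tree : List (List Int)) : List Int :=
  let branches := get_tree_struct cmtIDs tree
  let level_dict : PySem.Dict Int Int :=
    branches.foldl (fun d branch =>
      (PySem.List.enumerate branch 0).foldl (fun d ij => d.insert ij.2 ij.1) d) PySem.Dict.empty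
  level_dict.values

-- ===== PORT B =====
def get_sentences_depth_alt (cmtIDs : List Int) (tree : List (List Int)) : List Int :=
  -- index[id_] = index.get(id_, []) + [i]  over enumerate(cmtIDs)
  let index : PySem.Dict Int (List Int) :=
    (PySem.List.enumerate cmtIDs 0).foldl
      (fun d p => d.insert p.2 (d.getD p.2 [] ++ [p.1])) PySem.Dict.empty
  (tree.foldl (fun d branch =>
      (branch.foldl (fun (st : PySem.Dict Int Int × Int) cmtID =>
          (index.getD cmtID []).foldl
            (fun (st : PySem.Dict Int Int × Int) i => (st.1.insert i st.2, st.2 + 1)) st)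
        (d, (0 : Int))).1)
    (PySem.Dict.empty : PySem.Dict Int Int)).values

-- ===== PRECONDITION & SPEC =====
def Spec_get_sentences_depth (cmtIDs : List Int) (tree : List (List Int)) (out : List Int) : Prop := out = get_sentences_depth_alt cmtIDs tree
instance (cmtIDs : List Int) (tree : List (List Int)) (out : List Int) : Decidable (Spec_get_sentences_depth cmtIDs tree out) := by unfold Spec_get_sentences_depth; infer_instance

-- ===== CLAIM =====
def Claim_equal_get_sentences_depth : Prop := ∀ (cmtIDs : List Int) (tree : List (List Int)), Dom_get_sentences_depth cmtIDs tree → Spec_get_sentences_depth cmtIDs tree (get_sentences_depth cmtIDs tree)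

-- ===== LEMMAS AND PROOFS =====
-- indices of cmtIDs matching c (A's list comprehension)
def pvMatches (cmtIDs : List Int) (c : Int) : List Int :=
  ((PySem.List.enumerate cmtIDs 0).filter (fun p => p.2 == c)).map Prod.fst

-- B's index lookup yields exactly A's match list
theorem pv_index_getD (l : List (Int × Int)) (d : PySem.Dict Int (List Int)) (c : Int) :
    (l.foldl (fun d p => d.insert p.2 (d.getD p.2 [] ++ [p.1])) d).getD c []
    = d.getD c [] ++ ((l.filter (fun p => p.2 == c)).map Prod.fst) := by
  induction l generalizing d with
  | nil => simp
  | cons p l ih =>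
    by_cases h : p.2 = c
    · subst h
      simp only [List.foldl_cons, List.filter_cons, beq_self_eq_true, ite_true, List.map_cons]
      rw [ih, PySem.Dict.getD_insert_self, List.append_assoc]
      simp
    · simp only [List.foldl_cons, List.filter_cons, beq_iff_eq, h, ite_false]
      rw [ih, PySem.Dict.getD_insert_of_ne (hne := fun hh => h hh.symm)]

-- inner loop of B over a match list = enumerate-insert, counter advanced
theorem pv_inner (l : List Int) (d : PySem.Dict Int Int) (pos : Int) :
    l.foldl (fun (st : PySem.Dict Int Int × Int) i => (st.1.insert i st.2, st.2 + 1)) (d, pos)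
    = ((PySem.List.enumerate l pos).foldl (fun d ij => d.insert ij.2 ij.1) d,
       pos + l.length) := by
  induction l generalizing d pos with
  | nil => simp
  | cons i l ih =>
    simp only [List.foldl_cons, PySem.List.enumerate_cons, List.length_cons]
    rw [ih]
    exact Prod.ext rfl (by push_cast; ring)

-- middle loop of B over a branch = enumerate-insert over the concatenated matches
theorem pv_branch (cmtIDs : List Int) (branch : List Int) (d : PySem.Dict Int Int) (pos : Int) :
    branch.foldl (fun (st : PySem.Dict Int Int × Int) cmtID =>
        (pvMatches cmtIDs cmtID).foldl
          (fun (st : PySem.Dict Int Int × Int) i => (st.1.insert i st.2, st.2 + 1)) st) (d, pos)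
    = ((PySem.List.enumerate (branch.flatMap (pvMatches cmtIDs)) pos).foldl
         (fun d ij => d.insert ij.2 ij.1) d,
       pos + (branch.flatMap (pvMatches cmtIDs)).length) := by
  induction branch generalizing d pos with
  | nil => simp
  | cons c branch ih =>
    simp only [List.foldl_cons, List.flatMap_cons]
    rw [pv_inner, ih, PySem.List.enumerate_append, List.foldl_append]
    simp only [List.length_append, Prod.mk.injEq]
    exact ⟨trivial, by push_cast; ring⟩

-- A's per-branch sentIDs accumulation is the concatenated matches
theorem pv_sentIDs (cmtIDs : List Int) (branch : List Int) :
    branch.foldl (fun sentIDs cmtID =>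
      sentIDs ++ ((PySem.List.enumerate cmtIDs 0).filter (fun p => p.2 == cmtID)).map Prod.fst) []
    = branch.flatMap (pvMatches cmtIDs) := by
  simpa [pvMatches] using
    PySem.List.foldl_append_eq_flatMap (fun c =>
      ((PySem.List.enumerate cmtIDs 0).filter (fun p => p.2 == c)).map Prod.fst) branch []

-- ===== VERDICT =====
theorem get_sentences_depth_spec : Claim_equal_get_sentences_depth := by
  intro cmtIDs tree _
  unfold Spec_get_sentences_depth get_sentences_depth get_sentences_depth_alt get_tree_struct
  simp only [PySem.List.foldl_append_singleton_eq_map, List.nil_append, List.foldl_map]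
  have hidx : ∀ c : Int,
      ((PySem.List.enumerate cmtIDs 0).foldl
        (fun d p => d.insert p.2 (d.getD p.2 [] ++ [p.1]))
        (PySem.Dict.empty : PySem.Dict Int (List Int))).getD c []
      = pvMatches cmtIDs c := by
    intro c; rw [pv_index_getD]; simp [pvMatches]
  congr 1
  apply PySem.List.foldl_congr_mem
  intro d branch _
  simp only [hidx]
  rw [pv_branch, pv_sentIDs]
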